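-- pv_equiv track=rewrite | github.com/dataspider99/AddressFinder | HTMLSearch.py | extend_xpaths
-- ===== SOURCE A (Python) =====
-- def extend_xpaths(xpaths,element,keys):
--     new_xpaths = []
--     for xpath in xpaths:
--         if keys:
--             for key in keys:
--                 if key != 'alt':
--                     new_xpaths.append(xpath+"/{0}[@{1}='{2}']".format(element['tag'],key,element[key]))
--                 else:
--                     new_xpaths.append(xpath+"/{0}[@alt !='']/@alt".format(element['tag']))
--         else:
--             if 'index' in element.keys():
--                 new_xpaths.append(xpath+"/{0}[{1}]".format(element['tag'],element['index']))
--             else: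
--                 new_xpaths.append(xpath+"/{0}".format(element['tag']))
--
--     return new_xpaths
-- ===== SOURCE B (Python) =====
-- def _key_suffixes(xpath, element, keys):
--     # Recursive: one output string per key, head first.
--     if not keys:
--         return []
--     k = keys[0]
--     if k == 'alt':
--         head = xpath + "/{0}[@alt !='']/@alt".format(element['tag'])
--     else:
--         head = xpath + "/{0}[@{1}='{2}']".format(element['tag'], k, element[k])
--     return [head] + _key_suffixes(xpath, element, keys[1:])
--
--
-- def _row(xpath, element, keys):
--     if keys:
--         return _key_suffixes(xpath, element, keys)
--     if 'index' in element:
--         return [xpath + "/{0}[{1}]".format(element['tag'], element['index'])]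
--     return [xpath + "/{0}".format(element['tag'])]
--
--
-- def extend_xpaths(xpaths, element, keys):
--     # Recursive decomposition: the result for x::rest is row(x) ++ result(rest),
--     # built by list concatenation instead of A's flat loop with an accumulator.
--     if not xpaths:
--         return []
--     return _row(xpaths[0], element, keys) + extend_xpaths(xpaths[1:], element, keys)
-- ===== Notes on version B (the rewrite author's own statement) =====
-- stated objective: alternative
-- what changed: B is a recursive decomposition: a helper computes the row of strings for one xpath (itself by structural recursion on keys), and the result is defined as row(head) ++ extend_xpaths(tail), replacing A's nested imperative loops over a single mutable accumulator.
import Mathlib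
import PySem

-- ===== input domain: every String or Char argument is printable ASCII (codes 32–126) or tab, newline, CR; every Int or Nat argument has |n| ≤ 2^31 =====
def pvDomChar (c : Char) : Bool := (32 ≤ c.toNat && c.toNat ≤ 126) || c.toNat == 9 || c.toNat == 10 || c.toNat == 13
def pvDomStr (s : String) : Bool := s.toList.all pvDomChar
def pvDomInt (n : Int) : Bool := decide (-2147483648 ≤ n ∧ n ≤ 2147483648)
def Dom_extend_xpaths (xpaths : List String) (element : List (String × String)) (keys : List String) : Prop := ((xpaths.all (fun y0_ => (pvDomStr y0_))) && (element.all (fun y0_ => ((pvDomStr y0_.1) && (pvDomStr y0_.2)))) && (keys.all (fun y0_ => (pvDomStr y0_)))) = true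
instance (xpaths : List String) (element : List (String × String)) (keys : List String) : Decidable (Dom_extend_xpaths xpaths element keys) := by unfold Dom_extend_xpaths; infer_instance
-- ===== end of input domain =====

-- ===== PORT A =====
-- Python `element[k]`: first-match assoc-list lookup (KeyError = none, excluded by Pre_).
def pvGetD (e : List (String × String)) (k : String) : String := (e.lookup k).getD ""

def extend_xpaths (xpaths : List String) (element : List (String × String)) (keys : List String) : List String :=
  xpaths.foldl (fun new_xpaths xpath =>
    if keys ≠ [] then
      keys.foldl (fun acc key =>
        if key ≠ "alt" then
          acc ++ [xpath ++ "/" ++ pvGetD element "tag" ++ "[@" ++ key ++ "='" ++ pvGetD element key ++ "']"]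
        else
          acc ++ [xpath ++ "/" ++ pvGetD element "tag" ++ "[@alt !='']/@alt"]) new_xpaths
    else if (element.lookup "index").isSome then
      new_xpaths ++ [xpath ++ "/" ++ pvGetD element "tag" ++ "[" ++ pvGetD element "index" ++ "]"]
    else
      new_xpaths ++ [xpath ++ "/" ++ pvGetD element "tag"]) []

-- ===== PORT B =====
-- B: recursive decomposition — one string per key (recursion on keys), one row per xpath,
-- result = row(head) ++ recursive result(tail).
def keySuffixes (xpath : String) (element : List (String × String)) : List String → List String
  | [] => []
  | k :: ks =>
      (if k == "alt" then xpath ++ "/" ++ pvGetD element "tag" ++ "[@alt !='']/@alt"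
       else xpath ++ "/" ++ pvGetD element "tag" ++ "[@" ++ k ++ "='" ++ pvGetD element k ++ "']")
        :: keySuffixes xpath element ks

def rowOf (xpath : String) (element : List (String × String)) (keys : List String) : List String :=
  if keys ≠ [] then keySuffixes xpath element keys
  else if (element.lookup "index").isSome then
    [xpath ++ "/" ++ pvGetD element "tag" ++ "[" ++ pvGetD element "index" ++ "]"]
  else [xpath ++ "/" ++ pvGetD element "tag"]

def extend_xpaths_alt (xpaths : List String) (element : List (String × String)) (keys : List String) : List String :=
  match xpaths with
  | [] => []
  | x :: rest => rowOf x element keys ++ extend_xpaths_alt rest element keys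

-- ===== PRECONDITION & SPEC =====
-- Pre_ excludes exactly the inputs where Python A (and B) raises KeyError: nonempty xpaths with
-- element missing 'tag', or missing the value of some non-'alt' key in keys.
def Pre_extend_xpaths (xpaths : List String) (element : List (String × String)) (keys : List String) : Prop :=
  xpaths = [] ∨ ((element.lookup "tag").isSome ∧ ∀ k ∈ keys, k = "alt" ∨ (element.lookup k).isSome)
instance (xpaths : List String) (element : List (String × String)) (keys : List String) : Decidable (Pre_extend_xpaths xpaths element keys) := by unfold Pre_extend_xpaths; infer_instance
def pvWitness_extend_xpaths : List String × (List (String × String)) × List String :=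
  (["/a", "/b"], [("tag", "img"), ("src", "s"), ("alt", "h")], ["src", "alt"])
def Spec_extend_xpaths (xpaths : List String) (element : List (String × String)) (keys : List String) (out : List String) : Prop := out = extend_xpaths_alt xpaths element keys
instance (xpaths : List String) (element : List (String × String)) (keys : List String) (out : List String) : Decidable (Spec_extend_xpaths xpaths element keys out) := by unfold Spec_extend_xpaths; infer_instance

-- ===== CLAIM (what is proved, stated in full; the proofs are below) =====
def Claim_equal_extend_xpaths : Prop := ∀ (xpaths : List String) (element : List (String × String)) (keys : List String), Dom_extend_xpaths xpaths element keys → Pre_extend_xpaths xpaths element keys → Spec_extend_xpaths xpaths element keys (extend_xpaths xpaths element keys)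

-- ===== LEMMAS AND PROOFS =====
theorem inner_foldl_eq (xpath : String) (element : List (String × String)) :
    ∀ (keys : List String) (acc : List String),
      keys.foldl (fun acc key =>
        if key ≠ "alt" then
          acc ++ [xpath ++ "/" ++ pvGetD element "tag" ++ "[@" ++ key ++ "='" ++ pvGetD element key ++ "']"]
        else
          acc ++ [xpath ++ "/" ++ pvGetD element "tag" ++ "[@alt !='']/@alt"]) acc
        = acc ++ keySuffixes xpath element keys
  | [], acc => by simp [keySuffixes]
  | k :: ks, acc => by
    rw [List.foldl_cons, inner_foldl_eq xpath element ks]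
    by_cases h : k = "alt" <;> simp [keySuffixes, h]

theorem outer_foldl_eq (element : List (String × String)) (keys : List String) :
    ∀ (xpaths : List String) (acc : List String),
      xpaths.foldl (fun new_xpaths xpath =>
        if keys ≠ [] then
          keys.foldl (fun acc key =>
            if key ≠ "alt" then
              acc ++ [xpath ++ "/" ++ pvGetD element "tag" ++ "[@" ++ key ++ "='" ++ pvGetD element key ++ "']"]
            else
              acc ++ [xpath ++ "/" ++ pvGetD element "tag" ++ "[@alt !='']/@alt"]) new_xpaths
        else if (element.lookup "index").isSome then
          new_xpaths ++ [xpath ++ "/" ++ pvGetD element "tag" ++ "[" ++ pvGetD element "index" ++ "]"]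
        else
          new_xpaths ++ [xpath ++ "/" ++ pvGetD element "tag"]) acc
        = acc ++ extend_xpaths_alt xpaths element keys
  | [], acc => by simp [extend_xpaths_alt]
  | x :: rest, acc => by
    rw [List.foldl_cons, outer_foldl_eq element keys rest]
    by_cases hk : keys = []
    · subst hk
      by_cases hi : (element.lookup "index").isSome <;>
        simp [extend_xpaths_alt, rowOf, hi]
    · rw [if_pos hk, inner_foldl_eq]
      simp [extend_xpaths_alt, rowOf, hk]

-- ===== VERDICT (by name: the statement is the Claim_ definition above) =====
theorem extend_xpaths_spec : Claim_equal_extend_xpaths := by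
  intro xpaths element keys _ _
  show extend_xpaths xpaths element keys = extend_xpaths_alt xpaths element keys
  unfold extend_xpaths
  exact outer_foldl_eq element keys xpaths []
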